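-- pv_equiv track=rewrite | github.com/adei0s/LaunchSchool | PY110/PY110_small_problems/easy_5/staggered_case2.py | staggered_case
-- ===== SOURCE A (Python) =====
-- def staggered_case(string):
--     result = ''
--     cap = 1
--     for char in string:
--         if char.isalpha():
--             if cap == 1:
--                 result += char.upper()
--                 cap -= 1
--             else:
--                 result += char.lower()
--                 cap += 1
--         else:
--             result += char
--     return result
-- ===== SOURCE B (Python) =====
-- def staggered_case(string):
--     letters = [c.upper() if i % 2 == 0 else c.lower()
--                for i, c in enumerate([c for c in string if c.isalpha()])]
--     it = iter(letters)
--     return ''.join(next(it) if ch.isalpha() else ch for ch in string)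
-- ===== Notes on version B (the rewrite author's own statement) =====
-- stated objective: alternative
-- what changed: Replaces the single toggling loop with two passes: first build the list of case-alternated letters by filtering to alphabetic chars and mapping by index parity, then merge them back in place of the letters while copying non-letters.
import Mathlib
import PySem

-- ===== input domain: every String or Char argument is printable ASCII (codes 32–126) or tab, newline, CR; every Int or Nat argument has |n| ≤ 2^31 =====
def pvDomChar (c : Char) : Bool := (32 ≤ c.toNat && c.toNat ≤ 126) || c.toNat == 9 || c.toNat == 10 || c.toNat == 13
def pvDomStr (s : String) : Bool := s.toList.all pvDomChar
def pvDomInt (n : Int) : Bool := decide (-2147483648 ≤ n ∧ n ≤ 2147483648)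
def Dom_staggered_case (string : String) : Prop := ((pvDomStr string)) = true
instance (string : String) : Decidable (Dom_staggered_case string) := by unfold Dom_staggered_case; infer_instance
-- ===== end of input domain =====

-- B: two passes (filter+index-parity map to get the transformed letters, then a merge pass
-- re-inserting them among the non-letters) instead of A's single loop toggling a cap flag.
-- ===== PORT A =====
-- loop of A: state = (result so far, cap); transliterated as structural recursion over the chars
def pvFoldA : List Char → List Char → Int → List Char
  | [], result, _ => result
  | char :: rest, result, cap =>
    if PySem.Chars.isalpha char then
      if cap == 1 then pvFoldA rest (result ++ [PySem.Chars.upperChar char]) (cap - 1)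
      else pvFoldA rest (result ++ [PySem.Chars.lowerChar char]) (cap + 1)
    else pvFoldA rest (result ++ [char]) cap

def staggered_case (string : String) : String :=
  String.mk (pvFoldA string.toList [] 1)

-- ===== PORT B =====
-- merge pass: ''.join(next(it) if ch.isalpha() else ch for ch in string); the [] branch of the
-- letters iterator is unreachable (there is one transformed letter per alphabetic char)
def pvMergeB : List Char → List Char → List Char
  | [], _ => []
  | ch :: rest, letters =>
    if PySem.Chars.isalpha ch then
      match letters with
      | t :: q => t :: pvMergeB rest q
      | [] => ch :: pvMergeB rest []
    else ch :: pvMergeB rest letters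

def staggered_case_alt (string : String) : String :=
  let letters :=
    (PySem.List.enumerate (string.toList.filter (fun c => PySem.Chars.isalpha c))).map
      (fun p => if p.1 % 2 == 0 then PySem.Chars.upperChar p.2 else PySem.Chars.lowerChar p.2)
  String.mk (pvMergeB string.toList letters)

-- ===== PRECONDITION & SPEC =====
def Spec_staggered_case (string : String) (out : String) : Prop := out = staggered_case_alt string
instance (string : String) (out : String) : Decidable (Spec_staggered_case string out) := by unfold Spec_staggered_case; infer_instance

-- ===== CLAIM (what is proved, stated in full; the proofs are below) =====
def Claim_equal_staggered_case : Prop := ∀ (string : String), Dom_staggered_case string → Spec_staggered_case string (staggered_case string)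

-- ===== LEMMAS AND PROOFS =====

-- alternate-case helper used only by the proofs
def pvAlt : Bool → List Char → List Char
  | _, [] => []
  | b, c :: l => (if b then PySem.Chars.upperChar c else PySem.Chars.lowerChar c) :: pvAlt (!b) l

theorem pvEnumMap_eq_alt (l : List Char) (n : Int) :
    (PySem.List.enumerate l n).map
      (fun p => if p.1 % 2 == 0 then PySem.Chars.upperChar p.2 else PySem.Chars.lowerChar p.2)
      = pvAlt (n % 2 == 0) l := by
  induction l generalizing n with
  | nil => simp [PySem.List.enumerate_nil, pvAlt]
  | cons c l ih =>
    rw [PySem.List.enumerate_cons, List.map_cons, ih, pvAlt]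
    have h : ((n + 1) % 2 == 0) = !(n % 2 == 0) := by
      rcases Int.emod_two_eq_zero_or_one n with h | h <;> simp [Int.add_mul_emod_self_left, Int.emod_emod_of_dvd, h] <;> omega
    rw [h]

theorem pvMain (l : List Char) (b : Bool) (acc : List Char) :
    pvFoldA l acc (if b then 1 else 0)
      = acc ++ pvMergeB l (pvAlt b (l.filter (fun c => PySem.Chars.isalpha c))) := by
  induction l generalizing b acc with
  | nil => simp [pvFoldA, pvMergeB]
  | cons c l ih =>
    by_cases ha : PySem.Chars.isalpha c
    · cases b <;>
        simp only [pvFoldA, pvMergeB, List.filter_cons, ha, if_pos, if_true, pvAlt,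
          Bool.not_true, Bool.not_false, reduceIte] <;>
        [ (have := ih true (acc ++ [PySem.Chars.lowerChar c]));
          (have := ih false (acc ++ [PySem.Chars.upperChar c])) ] <;>
        simp only [if_true, if_false, Bool.false_eq_true, reduceIte] at this <;>
        · norm_num
          rw [this]; simp
    · simp only [pvFoldA, pvMergeB, List.filter_cons, ha, if_neg, Bool.false_eq_true, reduceIte]
      rw [ih b (acc ++ [c])]; simp

-- ===== VERDICT (by name: the statement is the Claim_ definition above) =====
theorem staggered_case_spec : Claim_equal_staggered_case := by
  intro s _
  unfold Spec_staggered_case staggered_case staggered_case_alt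
  rw [show (1:Int) = (if true then 1 else 0) from rfl, pvMain,
    show PySem.List.enumerate (s.toList.filter (fun c => PySem.Chars.isalpha c))
        = PySem.List.enumerate (s.toList.filter (fun c => PySem.Chars.isalpha c)) 0 from rfl,
    pvEnumMap_eq_alt]
  simp
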